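-- pv_equiv track=rewrite | github.com/mathensley/Algoritmos_Python | lista remota 2/divide_summarize.py | slice
-- ===== SOURCE A (Python) =====
-- def slice(arr, s):
--     s.add(sum(arr))
--     if len(set(arr)) > 1:
--         mid = (max(arr) + min(arr)) // 2
--         i = 0
--         while i < len(arr) and arr[i] <= mid:
--             i += 1
--         slice(arr[:i], s)
--         slice(arr[i:], s)
--     return s
-- ===== SOURCE B (Python) =====
-- # Same task, different machinery: one prefix-sum table gives every block sum in O(1),
-- # and the split point in a sorted block is found by binary search instead of a linear scan.
-- # Like A, mutates the set s in place and returns it.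
-- def slice(arr, s):
--     pref = [0]
--     run = 0
--     for x in arr:
--         run += x
--         pref.append(run)
--
--     def go(lo, hi):
--         s.add(pref[hi] - pref[lo])
--         if lo < hi and arr[lo] != arr[hi - 1]:
--             mid = (arr[lo] + arr[hi - 1]) // 2
--             a, b = lo, hi
--             while a < b:
--                 m = (a + b) // 2
--                 if arr[m] <= mid:
--                     a = m + 1
--                 else:
--                     b = m
--             go(lo, a)
--             go(a, hi)
--
--     go(0, len(arr))
--     return s
-- ===== Notes on version B (the rewrite author's own statement) =====
-- stated objective: faster
-- what changed: B precomputes one prefix-sum table so every block sum is O(1) instead of re-summing each copied slice, works on index ranges instead of copying sublists, and finds each split point by binary search instead of a linear scan.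
import Mathlib
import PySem

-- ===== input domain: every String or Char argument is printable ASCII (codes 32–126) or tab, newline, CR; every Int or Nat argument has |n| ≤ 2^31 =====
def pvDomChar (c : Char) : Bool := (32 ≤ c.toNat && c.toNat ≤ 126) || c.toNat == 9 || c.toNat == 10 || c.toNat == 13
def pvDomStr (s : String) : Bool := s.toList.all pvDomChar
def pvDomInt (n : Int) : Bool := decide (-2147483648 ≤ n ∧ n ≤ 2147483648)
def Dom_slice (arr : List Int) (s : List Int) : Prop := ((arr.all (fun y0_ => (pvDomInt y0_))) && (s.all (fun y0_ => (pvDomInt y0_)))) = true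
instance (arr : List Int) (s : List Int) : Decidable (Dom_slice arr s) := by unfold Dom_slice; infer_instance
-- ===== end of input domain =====

-- B replaces A's per-call slice copies, re-summing and linear split scan by one prefix-sum
-- table, index ranges and binary search. Both Pythons mutate the set s in place and return it;
-- the equivalence proved here is about the returned value (the mutation sequence is identical).

-- ===== PORT A =====
-- the while loop 'i = 0; while i < len(arr) and arr[i] <= mid: i += 1'
def sliceLead (mid : Int) : List Int → Nat
  | [] => 0
  | x :: xs => if x ≤ mid then sliceLead mid xs + 1 else 0

-- fuel only makes the recursion total; on sorted input the depth is < length + 1, so the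
-- fuel used in `slice` below is never exhausted there (proved in the lemmas).
def sliceFuel : Nat → List Int → PySem.Set Int → PySem.Set Int
  | 0, _, s => s
  | f + 1, arr, s =>
    let s1 := PySem.Set.add s arr.sum                       -- s.add(sum(arr))
    if 1 < (PySem.Set.ofList arr).length then               -- len(set(arr)) > 1
      match PySem.List.max? arr (fun x => x), PySem.List.min? arr (fun x => x) with
      | some mx, some mn =>
        let mid := PySem.Int.floordiv (mx + mn) 2           -- (max(arr)+min(arr)) // 2
        let i := sliceLead mid arr
        -- slice(arr[:i], s); slice(arr[i:], s)  (slices with 0 ≤ i ≤ len are take/drop)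
        sliceFuel f (List.drop i arr) (sliceFuel f (List.take i arr) s1)
      | _, _ => s1                                          -- unreachable: arr ≠ [] in this branch
    else s1

def slice (arr : List Int) (s : List Int) : List Int :=
  sliceFuel (arr.length + 1) arr s

-- ===== PORT B =====
-- pref = [0]; run = 0; for x in arr: run += x; pref.append(run)
def prefB (arr : List Int) : List Int :=
  (arr.foldl (fun (pr : List Int × Int) x => (pr.1 ++ [pr.2 + x], pr.2 + x)) ([0], 0)).1

-- the binary-search while loop; indices are Nats (in Source B they stay in [0, len]),
-- arr[m] with 0 ≤ m < len is List.getD (exact there)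
def bsearchB (arr : List Int) (mid : Int) (a b : Nat) : Nat :=
  if _h : a < b then
    let m := (a + b) / 2
    if arr.getD m 0 ≤ mid then bsearchB arr mid (m + 1) b else bsearchB arr mid a m
  else a
termination_by b - a
decreasing_by all_goals omega

-- go(lo, hi); fuel only makes the recursion total (depth < length + 1 on sorted input)
def goB (arr pref : List Int) : Nat → Nat → Nat → PySem.Set Int → PySem.Set Int
  | 0, _, _, s => s
  | f + 1, lo, hi, s =>
    let s1 := PySem.Set.add s (pref.getD hi 0 - pref.getD lo 0)   -- s.add(pref[hi]-pref[lo])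
    if lo < hi ∧ arr.getD lo 0 ≠ arr.getD (hi - 1) 0 then
      let mid := PySem.Int.floordiv (arr.getD lo 0 + arr.getD (hi - 1) 0) 2
      let a := bsearchB arr mid lo hi
      goB arr pref f a hi (goB arr pref f lo a s1)
    else s1

def slice_alt (arr : List Int) (s : List Int) : List Int :=
  goB arr (prefB arr) (arr.length + 1) 0 arr.length s

-- ===== PRECONDITION & SPEC =====
-- A's divide-at-mid scheme assumes arr sorted nondecreasing: on unsorted input the split index
-- can be 0 or len, a recursive call repeats the same list and Python A never returns
-- (RecursionError) — Pre_ excludes exactly those inputs, on which A returns nothing.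
def Pre_slice (arr : List Int) (s : List Int) : Prop := List.Pairwise (· ≤ ·) arr
instance (arr : List Int) (s : List Int) : Decidable (Pre_slice arr s) := by unfold Pre_slice; infer_instance
def pvWitness_slice : List Int × List Int := ([1, 2, 2, 5], [7])

def Spec_slice (arr : List Int) (s : List Int) (out : List Int) : Prop := out = slice_alt arr s
instance (arr : List Int) (s : List Int) (out : List Int) : Decidable (Spec_slice arr s out) := by unfold Spec_slice; infer_instance

-- ===== CLAIM (what is proved, stated in full; the proofs are below) =====
def Claim_equal_slice : Prop := ∀ (arr : List Int) (s : List Int), Dom_slice arr s → Pre_slice arr s → Spec_slice arr s (slice arr s)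

-- ===== LEMMAS AND PROOFS =====

-- characterisation of the prefix-sum table
theorem prefB_fold (l : List Int) (p : List Int) (r : Int) :
    l.foldl (fun (pr : List Int × Int) x => (pr.1 ++ [pr.2 + x], pr.2 + x)) (p, r)
      = (p ++ (List.range l.length).map (fun k => r + (l.take (k + 1)).sum), r + l.sum) := by
  induction l generalizing p r with
  | nil => simp
  | cons x xs ih =>
    simp only [List.foldl_cons, ih, List.length_cons, List.range_succ_eq_map, List.map_cons,
      List.map_map, List.sum_cons, List.take_succ_cons]
    simp [Function.comp_def, add_assoc]

theorem prefB_getD (arr : List Int) (i : Nat) (hi : i ≤ arr.length) :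
    (prefB arr).getD i 0 = (arr.take i).sum := by
  unfold prefB
  rw [prefB_fold]
  cases i with
  | zero => simp
  | succ k =>
    have hk : k < arr.length := by omega
    simp [List.getD, hk]

theorem prefB_sub (arr : List Int) (lo hi : Nat) (h1 : lo ≤ hi) (h2 : hi ≤ arr.length) :
    (prefB arr).getD hi 0 - (prefB arr).getD lo 0 = ((arr.drop lo).take (hi - lo)).sum := by
  rw [prefB_getD arr hi h2, prefB_getD arr lo (le_trans h1 h2)]
  have hsplit : arr.take hi = arr.take lo ++ (arr.drop lo).take (hi - lo) := by
    rw [show hi = lo + (hi - lo) from by omega, List.take_add]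
    simp
  rw [hsplit, List.sum_append]
  ring

-- sortedness transported to getD-indexing
theorem sorted_getD_mono (arr : List Int) (hs : List.Pairwise (· ≤ ·) arr)
    (i j : Nat) (hij : i ≤ j) (hj : j < arr.length) :
    arr.getD i 0 ≤ arr.getD j 0 := by
  rw [List.getD_eq_getElem _ _ (by omega), List.getD_eq_getElem _ _ hj]
  rcases eq_or_lt_of_le hij with h | h
  · simp [h]
  · exact List.pairwise_iff_getElem.mp hs i j (by omega) hj h

-- postcondition of A's linear scan
theorem lead_le_len (mid : Int) (l : List Int) : sliceLead mid l ≤ l.length := by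
  induction l with
  | nil => simp [sliceLead]
  | cons x xs ih =>
    simp only [sliceLead, List.length_cons]
    split <;> omega

theorem lead_below (mid : Int) (l : List Int) (j : Nat) (hj : j < sliceLead mid l)
    (hl : j < l.length) : l.getD j 0 ≤ mid := by
  induction l generalizing j with
  | nil => simp [sliceLead] at hj
  | cons x xs ih =>
    simp only [sliceLead] at hj
    split at hj
    · cases j with
      | zero => simpa
      | succ k => exact ih k (by omega) (by simpa using hl)
    · omega

theorem lead_above (mid : Int) (l : List Int) (hs : List.Pairwise (· ≤ ·) l) (j : Nat)
    (h1 : sliceLead mid l ≤ j) (h2 : j < l.length) : mid < l.getD j 0 := by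
  induction l generalizing j with
  | nil => simp at h2
  | cons x xs ih =>
    rw [List.pairwise_cons] at hs
    simp only [sliceLead] at h1
    split at h1
    · cases j with
      | zero => omega
      | succ k => exact ih hs.2 k (by omega) (by simpa using h2)
    · cases j with
      | zero => simpa using by omega
      | succ k =>
        have hk : k < xs.length := by simpa using h2
        have hmem : xs.getD k 0 ∈ xs := by
          rw [List.getD_eq_getElem _ _ hk]; exact List.getElem_mem hk
        calc mid < x := by omega
          _ ≤ xs.getD k 0 := hs.1 _ hmem

-- postcondition of B's binary search
theorem bsearch_post (arr : List Int) (hs : List.Pairwise (· ≤ ·) arr) (mid : Int) :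
    ∀ d a b, b - a = d → a ≤ b → b ≤ arr.length →
      a ≤ bsearchB arr mid a b ∧ bsearchB arr mid a b ≤ b ∧
      (∀ j, a ≤ j → j < bsearchB arr mid a b → arr.getD j 0 ≤ mid) ∧
      (∀ j, bsearchB arr mid a b ≤ j → j < b → mid < arr.getD j 0) := by
  intro d
  induction d using Nat.strong_induction_on with
  | _ d ih =>
    intro a b hd hab hbn
    rw [bsearchB]
    by_cases h : a < b
    · simp only [dif_pos h]
      have hm1 : a ≤ (a + b) / 2 := by omega
      have hm2 : (a + b) / 2 < b := by omega
      by_cases hmle : arr.getD ((a + b) / 2) 0 ≤ mid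
      · simp only [if_pos hmle]
        obtain ⟨p1, p2, p3, p4⟩ :=
          ih (b - ((a + b) / 2 + 1)) (by omega) ((a + b) / 2 + 1) b rfl (by omega) hbn
        refine ⟨by omega, p2, ?_, p4⟩
        intro j hj hjr
        by_cases hjm : j ≤ (a + b) / 2
        · exact le_trans (sorted_getD_mono arr hs j _ hjm (by omega)) hmle
        · exact p3 j (by omega) hjr
      · simp only [if_neg hmle]
        rw [not_le] at hmle
        obtain ⟨p1, p2, p3, p4⟩ :=
          ih ((a + b) / 2 - a) (by omega) a ((a + b) / 2) rfl (by omega) (by omega)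
        refine ⟨p1, by omega, p3, ?_⟩
        intro j hjr hjb
        by_cases hjm : j < (a + b) / 2
        · exact p4 j hjr hjm
        · exact lt_of_lt_of_le hmle (sorted_getD_mono arr hs _ j (by omega) (by omega))
    · simp only [dif_neg h]
      refine ⟨le_rfl, by omega, ?_, ?_⟩ <;> intro j hj hj' <;> omega

-- in a sorted list the first element is a lower bound and the last an upper bound
theorem sorted_head_le (l : List Int) (hs : List.Pairwise (· ≤ ·) l) (x : Int) (hx : x ∈ l) :
    l.getD 0 0 ≤ x := by
  obtain ⟨j, hj, rfl⟩ := List.mem_iff_getElem.mp hx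
  have := sorted_getD_mono l hs 0 j (Nat.zero_le _) hj
  have h2 : l.getD j 0 = l[j] := List.getD_eq_getElem l 0 hj
  rwa [h2] at this

theorem sorted_le_last (l : List Int) (hs : List.Pairwise (· ≤ ·) l) (x : Int) (hx : x ∈ l) :
    x ≤ l.getD (l.length - 1) 0 := by
  obtain ⟨j, hj, rfl⟩ := List.mem_iff_getElem.mp hx
  have := sorted_getD_mono l hs j (l.length - 1) (by omega) (by omega)
  have h2 : l.getD j 0 = l[j] := List.getD_eq_getElem l 0 hj
  rwa [h2] at this

-- a list with two distinct members has ≥ 2 elements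
theorem one_lt_length_of_two_mem {l : List Int} {x y : Int} (hx : x ∈ l) (hy : y ∈ l)
    (hxy : x ≠ y) : 1 < l.length := by
  match l with
  | [] => simp at hx
  | [a] =>
    simp at hx hy
    exact absurd (hx.trans hy.symm) hxy
  | a :: b :: t => simp

-- branch condition: len(set(sub)) > 1 ↔ endpoints of the sorted block differ
theorem cond_iff (sub : List Int) (hs : List.Pairwise (· ≤ ·) sub) (hne : sub ≠ []) :
    (1 < (PySem.Set.ofList sub).length ↔ sub.getD 0 0 ≠ sub.getD (sub.length - 1) 0) := by
  have hlen : 0 < sub.length := List.length_pos_of_ne_nil hne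
  constructor
  · intro hL
    by_contra heq
    -- all elements of sub are equal, so set(sub) has at most one element
    have hall : ∀ x ∈ sub, x = sub.getD 0 0 := by
      intro x hx
      have h1 := sorted_head_le sub hs x hx
      have h2 := sorted_le_last sub hs x hx
      omega
    match hof : PySem.Set.ofList sub with
    | [] => rw [hof] at hL; simp at hL
    | [a] => rw [hof] at hL; simp at hL
    | a :: b :: t =>
      have hnd := PySem.Set.nodup_ofList (xs := sub)
      rw [hof] at hnd
      have hab : a ≠ b := by
        rw [List.nodup_cons] at hnd
        intro h; exact hnd.1 (h ▸ List.mem_cons_self)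
      have ha : a ∈ sub := (PySem.Set.mem_ofList sub a).mp (by rw [hof]; simp)
      have hb : b ∈ sub := (PySem.Set.mem_ofList sub b).mp (by rw [hof]; simp)
      exact hab ((hall a ha).trans (hall b hb).symm)
  · intro hne2
    have h0 : sub.getD 0 0 ∈ sub := by
      rw [List.getD_eq_getElem _ _ hlen]; exact List.getElem_mem hlen
    have hl : sub.getD (sub.length - 1) 0 ∈ sub := by
      rw [List.getD_eq_getElem _ _ (by omega)]; exact List.getElem_mem (by omega)
    exact one_lt_length_of_two_mem ((PySem.Set.mem_ofList sub _).mpr h0)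
      ((PySem.Set.mem_ofList sub _).mpr hl) hne2

-- the main simulation: A on the copied block  =  B on the index range
theorem main_sim (arr : List Int) (hs : List.Pairwise (· ≤ ·) arr) :
    ∀ f lo hi (s : PySem.Set Int), lo ≤ hi → hi ≤ arr.length → hi - lo < f →
      sliceFuel f ((arr.drop lo).take (hi - lo)) s = goB arr (prefB arr) f lo hi s := by
  intro f
  induction f with
  | zero => intro lo hi s h1 h2 h3; omega
  | succ f ih =>
    intro lo hi s h1 h2 h3
    have hlen : ((arr.drop lo).take (hi - lo)).length = hi - lo := by
      simp; omega
    have hsubsort : List.Pairwise (· ≤ ·) ((arr.drop lo).take (hi - lo)) :=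
      List.Pairwise.sublist ((List.take_sublist _ _).trans (List.drop_sublist _ _)) hs
    have hidx : ∀ j, j < hi - lo →
        ((arr.drop lo).take (hi - lo)).getD j 0 = arr.getD (lo + j) 0 := by
      intro j hj
      rw [List.getD_eq_getElem _ 0 (by omega), List.getD_eq_getElem arr 0 (by omega)]
      simp [List.getElem_take, List.getElem_drop]
    have hsum : (prefB arr).getD hi 0 - (prefB arr).getD lo 0
        = ((arr.drop lo).take (hi - lo)).sum := prefB_sub arr lo hi h1 h2
    simp only [sliceFuel, goB]
    by_cases hc : lo < hi ∧ arr.getD lo 0 ≠ arr.getD (hi - 1) 0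
    · obtain ⟨hlohi, hne⟩ := hc
      have hnesub : (arr.drop lo).take (hi - lo) ≠ [] := by
        intro h; rw [h] at hlen; simp at hlen; omega
      have hca : 1 < (PySem.Set.ofList ((arr.drop lo).take (hi - lo))).length := by
        rw [cond_iff _ hsubsort hnesub, hlen, hidx 0 (by omega),
          hidx (hi - lo - 1) (by omega), show lo + 0 = lo from by omega,
          show lo + (hi - lo - 1) = hi - 1 from by omega]
        exact hne
      rw [if_pos hca, if_pos (show lo < hi ∧ arr.getD lo 0 ≠ arr.getD (hi - 1) 0 from ⟨hlohi, hne⟩)]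
      cases hmx : PySem.List.max? ((arr.drop lo).take (hi - lo)) (fun x => x) with
      | none =>
        rw [PySem.List.max?_eq_none_iff] at hmx
        exact absurd hmx hnesub
      | some mx =>
      cases hmn : PySem.List.min? ((arr.drop lo).take (hi - lo)) (fun x => x) with
      | none =>
        rw [PySem.List.min?_eq_none_iff] at hmn
        exact absurd hmn hnesub
      | some mn =>
      -- the extreme values are the endpoints of the sorted block
      have hmem0 : ((arr.drop lo).take (hi - lo)).getD 0 0 ∈ (arr.drop lo).take (hi - lo) := by
        rw [List.getD_eq_getElem _ 0 (by omega)]; exact List.getElem_mem (by omega)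
      have hmeml : ((arr.drop lo).take (hi - lo)).getD (hi - lo - 1) 0
          ∈ (arr.drop lo).take (hi - lo) := by
        rw [List.getD_eq_getElem _ 0 (by omega)]; exact List.getElem_mem (by omega)
      have hmneq : mn = arr.getD lo 0 := by
        have hm1 := PySem.List.min?_mem hmn
        have hm2 := PySem.List.min?_isMin hmn
        have hle1 := sorted_head_le _ hsubsort mn hm1
        have hle2 := hm2 _ hmem0
        simp only at hle2
        have h0 : ((arr.drop lo).take (hi - lo)).getD 0 0 = arr.getD lo 0 := by
          have := hidx 0 (by omega)
          rwa [show lo + 0 = lo from by omega] at this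
        omega
      have hmxeq : mx = arr.getD (hi - 1) 0 := by
        have hm1 := PySem.List.max?_mem hmx
        have hm2 := PySem.List.max?_isMax hmx
        have hle1 := sorted_le_last _ hsubsort mx hm1
        have hle2 := hm2 _ hmeml
        simp only at hle2
        rw [hlen] at hle1
        have h0 : ((arr.drop lo).take (hi - lo)).getD (hi - lo - 1) 0 = arr.getD (hi - 1) 0 := by
          have := hidx (hi - lo - 1) (by omega)
          rwa [show lo + (hi - lo - 1) = hi - 1 from by omega] at this
        omega
      have hmid : PySem.Int.floordiv (mx + mn) 2
          = PySem.Int.floordiv (arr.getD lo 0 + arr.getD (hi - 1) 0) 2 := by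
        rw [hmneq, hmxeq, add_comm]
      dsimp only
      rw [hmid]
      have hlt : arr.getD lo 0 < arr.getD (hi - 1) 0 :=
        lt_of_le_of_ne (sorted_getD_mono arr hs lo (hi - 1) (by omega) (by omega)) hne
      have hdv : PySem.Int.floordiv (arr.getD lo 0 + arr.getD (hi - 1) 0) 2
          = (arr.getD lo 0 + arr.getD (hi - 1) 0) / 2 :=
        PySem.Int.floordiv_eq_ediv_of_pos (by norm_num)
      have hb1 : arr.getD lo 0 ≤ PySem.Int.floordiv (arr.getD lo 0 + arr.getD (hi - 1) 0) 2 := by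
        rw [hdv]; omega
      have hb2 : PySem.Int.floordiv (arr.getD lo 0 + arr.getD (hi - 1) 0) 2
          < arr.getD (hi - 1) 0 := by
        rw [hdv]; omega
      obtain ⟨hB1, hB2, hB3, hB4⟩ := bsearch_post arr hs
        (PySem.Int.floordiv (arr.getD lo 0 + arr.getD (hi - 1) 0) 2)
        (hi - lo) lo hi rfl (le_of_lt hlohi) h2
      have hile : sliceLead (PySem.Int.floordiv (arr.getD lo 0 + arr.getD (hi - 1) 0) 2)
          ((arr.drop lo).take (hi - lo)) ≤ hi - lo := by
        have := lead_le_len (PySem.Int.floordiv (arr.getD lo 0 + arr.getD (hi - 1) 0) 2)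
          ((arr.drop lo).take (hi - lo))
        omega
      have hipos : 0 < sliceLead (PySem.Int.floordiv (arr.getD lo 0 + arr.getD (hi - 1) 0) 2)
          ((arr.drop lo).take (hi - lo)) := by
        by_contra h0
        have := lead_above (PySem.Int.floordiv (arr.getD lo 0 + arr.getD (hi - 1) 0) 2)
          ((arr.drop lo).take (hi - lo)) hsubsort 0 (by omega) (by omega)
        rw [hidx 0 (by omega), show lo + 0 = lo from by omega] at this
        omega
      have hilt : sliceLead (PySem.Int.floordiv (arr.getD lo 0 + arr.getD (hi - 1) 0) 2)
          ((arr.drop lo).take (hi - lo)) < hi - lo := by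
        by_contra h0
        have := lead_below (PySem.Int.floordiv (arr.getD lo 0 + arr.getD (hi - 1) 0) 2)
          ((arr.drop lo).take (hi - lo)) (hi - lo - 1) (by omega) (by omega)
        rw [hidx (hi - lo - 1) (by omega), show lo + (hi - lo - 1) = hi - 1 from by omega] at this
        omega
      have hreq : bsearchB arr (PySem.Int.floordiv (arr.getD lo 0 + arr.getD (hi - 1) 0) 2) lo hi
          = lo + sliceLead (PySem.Int.floordiv (arr.getD lo 0 + arr.getD (hi - 1) 0) 2)
              ((arr.drop lo).take (hi - lo)) := by
        rcases Nat.lt_trichotomy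
          (bsearchB arr (PySem.Int.floordiv (arr.getD lo 0 + arr.getD (hi - 1) 0) 2) lo hi)
          (lo + sliceLead (PySem.Int.floordiv (arr.getD lo 0 + arr.getD (hi - 1) 0) 2)
            ((arr.drop lo).take (hi - lo))) with h | h | h
        · exfalso
          have h4 := hB4 _ le_rfl (by omega)
          have h5 := lead_below (PySem.Int.floordiv (arr.getD lo 0 + arr.getD (hi - 1) 0) 2)
            ((arr.drop lo).take (hi - lo))
            (bsearchB arr (PySem.Int.floordiv (arr.getD lo 0 + arr.getD (hi - 1) 0) 2) lo hi - lo)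
            (by omega) (by omega)
          rw [hidx _ (by omega), show lo +
            (bsearchB arr (PySem.Int.floordiv (arr.getD lo 0 + arr.getD (hi - 1) 0) 2) lo hi - lo)
            = bsearchB arr (PySem.Int.floordiv (arr.getD lo 0 + arr.getD (hi - 1) 0) 2) lo hi
            from by omega] at h5
          omega
        · exact h
        · exfalso
          have h3 := hB3 _ (by omega) h
          have h5 := lead_above (PySem.Int.floordiv (arr.getD lo 0 + arr.getD (hi - 1) 0) 2)
            ((arr.drop lo).take (hi - lo)) hsubsort _ le_rfl (by omega)
          rw [hidx _ hilt] at h5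
          omega
      rw [hsum, hreq]
      have e1 : ∀ s' : PySem.Set Int,
          sliceFuel f (((arr.drop lo).take (hi - lo)).take
            (sliceLead (PySem.Int.floordiv (arr.getD lo 0 + arr.getD (hi - 1) 0) 2)
              ((arr.drop lo).take (hi - lo)))) s'
          = goB arr (prefB arr) f lo
              (lo + sliceLead (PySem.Int.floordiv (arr.getD lo 0 + arr.getD (hi - 1) 0) 2)
                ((arr.drop lo).take (hi - lo))) s' := by
        intro s'
        have h' := ih lo (lo + sliceLead (PySem.Int.floordiv (arr.getD lo 0 + arr.getD (hi - 1) 0) 2)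
          ((arr.drop lo).take (hi - lo))) s' (by omega) (by omega) (by omega)
        rw [← h']
        congr 1
        rw [List.take_take, min_eq_left (le_of_lt hilt)]
        congr 1
        omega
      have e2 : ∀ s' : PySem.Set Int,
          sliceFuel f (((arr.drop lo).take (hi - lo)).drop
            (sliceLead (PySem.Int.floordiv (arr.getD lo 0 + arr.getD (hi - 1) 0) 2)
              ((arr.drop lo).take (hi - lo)))) s'
          = goB arr (prefB arr) f
              (lo + sliceLead (PySem.Int.floordiv (arr.getD lo 0 + arr.getD (hi - 1) 0) 2)
                ((arr.drop lo).take (hi - lo))) hi s' := by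
        intro s'
        have h' := ih (lo + sliceLead (PySem.Int.floordiv (arr.getD lo 0 + arr.getD (hi - 1) 0) 2)
          ((arr.drop lo).take (hi - lo))) hi s' (by omega) h2 (by omega)
        rw [← h']
        congr 1
        rw [List.drop_take, List.drop_drop]
        congr 1
        omega
      rw [e1, e2]
    · have hca : ¬ 1 < (PySem.Set.ofList ((arr.drop lo).take (hi - lo))).length := by
        by_cases hlh : lo < hi
        · have hnesub : (arr.drop lo).take (hi - lo) ≠ [] := by
            intro h; rw [h] at hlen; simp at hlen; omega
          rw [cond_iff _ hsubsort hnesub, hlen, hidx 0 (by omega),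
            hidx (hi - lo - 1) (by omega), show lo + 0 = lo from by omega,
            show lo + (hi - lo - 1) = hi - 1 from by omega]
          intro hne
          exact hc ⟨hlh, hne⟩
        · have : hi - lo = 0 := by omega
          rw [this]
          simp [PySem.Set.ofList]
      rw [if_neg hca, if_neg hc, hsum]

-- ===== VERDICT (by name: the statement is the Claim_ definition above) =====
theorem slice_spec : Claim_equal_slice := by
  intro arr s _hd hpre
  unfold Spec_slice slice slice_alt
  have := main_sim arr hpre (arr.length + 1) 0 arr.length s (Nat.zero_le _) le_rfl (by omega)
  simpa using this
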